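-- pv_equiv track=rewrite | github.com/AxelBlazerGit/LeetCode | medium/2270. Number of Ways to Split Array.py | waysToSplitArray
-- ===== SOURCE A (Python) =====
-- from typing import List
--
-- def waysToSplitArray(nums: List[int]) -> int:
--     rem=sum(nums)
--     cur=splits=0
--     for i in nums[:-1]:
--         cur+=i
--         rem-=i
--         if cur>=rem:
--             splits+=1
--     return splits
-- ===== SOURCE B (Python) =====
-- from typing import List
--
-- def waysToSplitArray(nums: List[int]) -> int:
--     total = sum(nums)
--     ps, s = [], 0
--     for x in nums[:-1]:
--         s += x
--         ps.append(s)
--     ps.sort(reverse=True)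
--     count = 0
--     for p in ps:
--         if 2 * p < total:
--             break
--         count += 1
--     return count
-- ===== Notes on version B (the rewrite author's own statement) =====
-- stated objective: alternative
-- what changed: Instead of one accumulator pass comparing running left/right sums, B builds the prefix-sum table, sorts it in descending order, and counts by scanning the sorted list with an early break, valid because the test 2*p >= total is monotone in p so the qualifying prefixes form an initial segment of the sorted order.
import Mathlib
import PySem

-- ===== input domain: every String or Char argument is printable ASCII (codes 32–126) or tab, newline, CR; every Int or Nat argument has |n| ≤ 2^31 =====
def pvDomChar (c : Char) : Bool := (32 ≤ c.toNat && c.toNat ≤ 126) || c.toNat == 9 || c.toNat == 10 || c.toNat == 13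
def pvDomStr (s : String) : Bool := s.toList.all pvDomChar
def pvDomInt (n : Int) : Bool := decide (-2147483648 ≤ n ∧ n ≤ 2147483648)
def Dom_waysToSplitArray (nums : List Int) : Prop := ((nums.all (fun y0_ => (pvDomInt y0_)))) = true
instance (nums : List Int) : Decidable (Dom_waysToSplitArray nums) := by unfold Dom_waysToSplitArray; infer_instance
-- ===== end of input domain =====

-- B replaces A's single accumulator pass by: build the prefix-sum table, sort it
-- descending, count with an early-break scan (alternative structure, same results).

-- ===== PORT A =====
-- the for-loop of A, state (cur, rem, splits)
def pvGoA : List Int → Int → Int → Int → Int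
  | [], _, _, splits => splits
  | i :: t, cur, rem, splits =>
      pvGoA t (cur + i) (rem - i) (if cur + i ≥ rem - i then splits + 1 else splits)

def waysToSplitArray (nums : List Int) : Int :=
  pvGoA nums.dropLast 0 nums.sum 0

-- ===== PORT B =====
-- first loop of B: running sum s, appending each prefix sum
def pvBuildPs : List Int → Int → List Int
  | [], _ => []
  | x :: t, s => (s + x) :: pvBuildPs t (s + x)

-- second loop of B: scan the sorted list, break at the first p with 2*p < total
def pvCountScan : List Int → Int → Int
  | [], _ => 0
  | p :: t, total => if 2 * p < total then 0 else pvCountScan t total + 1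

def waysToSplitArray_alt (nums : List Int) : Int :=
  let total := nums.sum
  let ps := pvBuildPs nums.dropLast 0
  let psSorted := PySem.List.sorted ps (fun p => p) true
  pvCountScan psSorted total

-- ===== PRECONDITION & SPEC =====
def Spec_waysToSplitArray (nums : List Int) (out : Int) : Prop := out = waysToSplitArray_alt nums
instance (nums : List Int) (out : Int) : Decidable (Spec_waysToSplitArray nums out) := by unfold Spec_waysToSplitArray; infer_instance

-- ===== CLAIM (what is proved, stated in full; the proofs are below) =====
def Claim_equal_waysToSplitArray : Prop := ∀ (nums : List Int), Dom_waysToSplitArray nums → Spec_waysToSplitArray nums (waysToSplitArray nums)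

-- ===== LEMMAS AND PROOFS =====
-- A's loop counts the prefix sums p (cur + initial segment) with 2*p ≥ cur + rem
lemma pvGoA_eq (l : List Int) : ∀ (cur rem splits : Int),
    pvGoA l cur rem splits =
      splits + (((pvBuildPs l cur).countP (fun p => 2 * p ≥ cur + rem) : Nat) : Int) := by
  induction l with
  | nil => intro cur rem splits; simp [pvGoA, pvBuildPs]
  | cons x t ih =>
    intro cur rem splits
    have hc : cur + x + (rem - x) = cur + rem := by ring
    simp only [pvGoA, pvBuildPs, ih, List.countP_cons, hc]
    by_cases h : cur + x ≥ rem - x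
    · have h2 : 2 * (cur + x) ≥ cur + rem := by omega
      simp [h, h2]; omega
    · have h2 : ¬ 2 * (cur + x) ≥ cur + rem := by omega
      simp [h, h2]

-- on a descending list the early-break scan counts exactly the elements satisfying
-- the (monotone) test
lemma pvCountScan_eq_countP (l : List Int) (total : Int)
    (hs : l.Pairwise (fun a b => b ≤ a)) :
    pvCountScan l total = ((l.countP (fun p => 2 * p ≥ total) : Nat) : Int) := by
  induction l with
  | nil => simp [pvCountScan]
  | cons p t ih =>
    rcases List.pairwise_cons.mp hs with ⟨hhead, htail⟩
    simp only [pvCountScan, List.countP_cons]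
    by_cases h : 2 * p < total
    · have hz : t.countP (fun p => 2 * p ≥ total) = 0 := by
        apply List.countP_eq_zero.mpr
        intro y hy
        have := hhead y hy
        simp only [decide_eq_true_eq]
        omega
      have hph : ¬ (2 * p ≥ total) := by omega
      simp [h, hz, hph]
    · have hph : (2 * p ≥ total) := by omega
      simp [h, ih htail, hph]

-- ===== VERDICT (by name: the statement is the Claim_ definition above) =====
theorem waysToSplitArray_spec : Claim_equal_waysToSplitArray := by
  intro nums _
  unfold Spec_waysToSplitArray waysToSplitArray waysToSplitArray_alt
  have hperm : (PySem.List.sorted (pvBuildPs nums.dropLast 0) (fun p => p) true).Perm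
      (pvBuildPs nums.dropLast 0) := PySem.List.sorted_perm _ _ _
  rw [pvGoA_eq, pvCountScan_eq_countP _ _ (PySem.List.sorted_pairwise_rev _ _),
      hperm.countP_eq]
  simp
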